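-- pv_equiv track=rewrite | github.com/skochv04/algorithms-and-data-structures | lab12/Cw 3.py | rec
-- ===== SOURCE A (Python) =====
-- def rec(T, l1, l2, i=0):
--     if i == len(T):
--         return 0
--     res1 = res2 = 0
--     if l1 >= T[i]:
--         res1 = rec(T, l1 - T[i], l2, i + 1) + 1
--     if l2 >= T[i] and l2 != l1:
--         res2 = rec(T, l1, l2 - T[i], i + 1) + 1
--     return max(res1, res2)
-- ===== SOURCE B (Python) =====
-- def rec(T, l1, l2, i=0):
--     # Breadth-first over the set of reachable (capacity1, capacity2) states,
--     # one level per item; the level count at which the frontier dies out is the answer.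
--     frontier = {(l1, l2)}
--     count = 0
--     for j in range(i, len(T)):
--         t = T[j]
--         nxt = set()
--         for (a, b) in frontier:
--             if a >= t:
--                 nxt.add((a - t, b))
--             if b >= t and b != a:
--                 nxt.add((a, b - t))
--         if not nxt:
--             break
--         frontier = nxt
--         count += 1
--     return count
-- ===== Notes on version B (the rewrite author's own statement) =====
-- stated objective: alternative
-- what changed: Replaces A's exponential depth-first branching recursion by an iterative breadth-first sweep that keeps the deduplicated set of reachable (capacity1, capacity2) states per item and returns the level at which the frontier dies out.
import Mathlib
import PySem

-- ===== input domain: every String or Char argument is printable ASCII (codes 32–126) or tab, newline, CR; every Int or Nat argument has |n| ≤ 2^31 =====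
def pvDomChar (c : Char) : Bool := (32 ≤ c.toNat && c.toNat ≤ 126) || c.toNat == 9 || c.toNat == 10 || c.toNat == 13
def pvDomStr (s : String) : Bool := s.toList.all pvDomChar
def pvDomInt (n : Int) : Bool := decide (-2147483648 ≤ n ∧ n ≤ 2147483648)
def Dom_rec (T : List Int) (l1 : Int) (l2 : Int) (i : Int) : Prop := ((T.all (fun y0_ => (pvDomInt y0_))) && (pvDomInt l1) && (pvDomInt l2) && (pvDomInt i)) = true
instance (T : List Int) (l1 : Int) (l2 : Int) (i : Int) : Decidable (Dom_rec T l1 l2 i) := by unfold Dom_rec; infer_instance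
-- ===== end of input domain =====

-- B replaces A's exponential depth-first branching recursion by a breadth-first sweep over the
-- deduplicated set of reachable (capacity1, capacity2) states, one level per item (objective: alternative).

-- ===== PORT A =====
-- termination helper, cited by the ports' decreasing_by
theorem pvGetSome_lt {T : List Int} {i : Int} {t : Int}
    (h : PySem.List.pyGet? T i = some t) : i < T.length := by
  have hn : ¬ PySem.List.pyGet? T i = none := by simp [h]
  rw [PySem.List.pyGet?_eq_none_iff, not_not] at hn
  simp [PySem.Raise.InRange] at hn
  omega

def rec (T : List Int) (l1 : Int) (l2 : Int) (i : Int) : Int :=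
  if i = T.length then 0
  else
    match h : PySem.List.pyGet? T i with
    | none => 0      -- Python raises IndexError here; excluded by Pre_rec
    | some t =>
      let res1 := if l1 ≥ t then rec T (l1 - t) l2 (i + 1) + 1 else 0
      let res2 := if l2 ≥ t ∧ l2 ≠ l1 then rec T l1 (l2 - t) (i + 1) + 1 else 0
      max res1 res2
termination_by (T.length - i).toNat
decreasing_by
  · have := pvGetSome_lt h; omega
  · have := pvGetSome_lt h; omega

-- ===== PORT B =====
-- one BFS level: the set of successor states of every state in the frontier
def recBfsStep (t : Int) (frontier : PySem.Set (Int × Int)) : PySem.Set (Int × Int) :=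
  frontier.foldl (fun s p =>
    let s1 := if p.1 ≥ t then PySem.Set.add s (p.1 - t, p.2) else s
    if p.2 ≥ t ∧ p.2 ≠ p.1 then PySem.Set.add s1 (p.1, p.2 - t) else s1)
    PySem.Set.empty

-- the 'for j in range(i, len(T))' loop of Source B, with its early break
def recBfsLoop (T : List Int) (j : Int) (frontier : PySem.Set (Int × Int)) (count : Int) : Int :=
  if T.length ≤ j then count
  else
    match PySem.List.pyGet? T j with
    | none => count      -- Python raises IndexError here; excluded by Pre_rec
    | some t =>
      let nxt := recBfsStep t frontier
      if nxt = [] then count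
      else recBfsLoop T (j + 1) nxt (count + 1)
termination_by (T.length - j).toNat
decreasing_by omega

def rec_alt (T : List Int) (l1 : Int) (l2 : Int) (i : Int) : Int :=
  recBfsLoop T i (PySem.Set.ofList [(l1, l2)]) 0

-- ===== PRECONDITION & SPEC =====
-- exactly the inputs on which the Python A returns (i out of [-len, len] raises IndexError)
def Pre_rec (T : List Int) (l1 : Int) (l2 : Int) (i : Int) : Prop :=
  -(T.length : Int) ≤ i ∧ i ≤ T.length
instance (T : List Int) (l1 : Int) (l2 : Int) (i : Int) : Decidable (Pre_rec T l1 l2 i) := by unfold Pre_rec; infer_instance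
def pvWitness_rec : List Int × Int × Int × Int := ([2, 3, 1], 4, 3, 0)

def Spec_rec (T : List Int) (l1 : Int) (l2 : Int) (i : Int) (out : Int) : Prop := out = rec_alt T l1 l2 i
instance (T : List Int) (l1 : Int) (l2 : Int) (i : Int) (out : Int) : Decidable (Spec_rec T l1 l2 i out) := by unfold Spec_rec; infer_instance

-- ===== CLAIM (what is proved, stated in full; the proofs are below) =====
def Claim_equal_rec : Prop := ∀ (T : List Int) (l1 : Int) (l2 : Int) (i : Int), Dom_rec T l1 l2 i → Pre_rec T l1 l2 i → Spec_rec T l1 l2 i (rec T l1 l2 i)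

-- ===== LEMMAS AND PROOFS =====

-- A's value is always nonnegative
theorem rec_nonneg (T : List Int) (l1 l2 i : Int) : 0 ≤ rec T l1 l2 i := by
  fun_induction rec T l1 l2 i with
  | case1 => simp
  | case2 => simp
  | case3 =>
    rename_i res1 res2 ih1 ih2
    have h1 : 0 ≤ res1 := by simp only [res1]; split <;> omega
    exact le_max_of_le_left h1

-- A's one-step unfolding at an in-range index
theorem rec_step (T : List Int) (a b j t : Int) (hj : ¬ j = T.length)
    (h : PySem.List.pyGet? T j = some t) :
    rec T a b j =
      max (if a ≥ t then rec T (a - t) b (j + 1) + 1 else 0)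
          (if b ≥ t ∧ b ≠ a then rec T a (b - t) (j + 1) + 1 else 0) := by
  rw [rec.eq_def]
  simp only [hj, if_false]
  split
  · simp_all
  · rename_i t' heq
    rw [h] at heq
    injection heq with he
    subst he
    rfl

-- generic facts about 'foldl max' over a list
theorem foldlMax_init_le {α : Type} (v : α → Int) (S : List α) (m : Int) :
    m ≤ S.foldl (fun m p => max m (v p)) m := by
  induction S generalizing m with
  | nil => simp
  | cons p S ih => simpa using le_trans (le_max_left m (v p)) (ih _)

theorem foldlMax_mem_le {α : Type} (v : α → Int) {S : List α} {q : α} (hq : q ∈ S) (m : Int) :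
    v q ≤ S.foldl (fun m p => max m (v p)) m := by
  induction S generalizing m with
  | nil => cases hq
  | cons p S ih =>
    rcases List.mem_cons.1 hq with h | h
    · subst h; exact le_trans (le_max_right m (v q)) (foldlMax_init_le v S _)
    · simpa using ih h _
theorem foldlMax_le {α : Type} (v : α → Int) {S : List α} {c : Int} (m : Int)
    (hm : m ≤ c) (h : ∀ p ∈ S, v p ≤ c) :
    S.foldl (fun m p => max m (v p)) m ≤ c := by
  induction S generalizing m with
  | nil => simpa
  | cons p S ih =>
    simp only [List.foldl_cons]
    exact ih _ (max_le hm (h p (by simp))) (fun q hq => h q (by simp [hq]))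

-- the max of A's value over a frontier
def recMaxOver (T : List Int) (j : Int) (S : List (Int × Int)) : Int :=
  S.foldl (fun m p => max m (rec T p.1 p.2 j)) 0

theorem recMaxOver_nonneg (T : List Int) (j : Int) (S : List (Int × Int)) :
    0 ≤ recMaxOver T j S := foldlMax_init_le _ S 0

-- membership characterisation of one BFS step
theorem mem_recBfsStep (t : Int) (S : List (Int × Int)) (q : Int × Int) :
    q ∈ recBfsStep t S ↔
      ∃ p ∈ S, (p.1 ≥ t ∧ q = (p.1 - t, p.2)) ∨ (p.2 ≥ t ∧ p.2 ≠ p.1 ∧ q = (p.1, p.2 - t)) := by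
  have aux : ∀ (S : List (Int × Int)) (acc : PySem.Set (Int × Int)),
      q ∈ S.foldl (fun s p =>
        let s1 := if p.1 ≥ t then PySem.Set.add s (p.1 - t, p.2) else s
        if p.2 ≥ t ∧ p.2 ≠ p.1 then PySem.Set.add s1 (p.1, p.2 - t) else s1) acc ↔
      q ∈ acc ∨ ∃ p ∈ S, (p.1 ≥ t ∧ q = (p.1 - t, p.2)) ∨ (p.2 ≥ t ∧ p.2 ≠ p.1 ∧ q = (p.1, p.2 - t)) := by
    intro S
    induction S with
    | nil => simp
    | cons p S ih =>
      intro acc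
      have hstep : ∀ acc' : PySem.Set (Int × Int),
          q ∈ (let s1 := if p.1 ≥ t then PySem.Set.add acc' (p.1 - t, p.2) else acc';
               if p.2 ≥ t ∧ p.2 ≠ p.1 then PySem.Set.add s1 (p.1, p.2 - t) else s1) ↔
          q ∈ acc' ∨ ((p.1 ≥ t ∧ q = (p.1 - t, p.2)) ∨ (p.2 ≥ t ∧ p.2 ≠ p.1 ∧ q = (p.1, p.2 - t))) := by
        intro acc'
        by_cases h1 : p.1 ≥ t <;> by_cases h2 : p.2 ≥ t <;> by_cases h3 : p.2 = p.1 <;>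
          simp [h1, h2, h3, PySem.Set.mem_add] <;> tauto
      rw [List.foldl_cons, ih, hstep]
      simp only [List.mem_cons]
      constructor
      · rintro ((h | h) | ⟨p', hp', hQ⟩)
        · exact Or.inl h
        · exact Or.inr ⟨p, Or.inl rfl, h⟩
        · exact Or.inr ⟨p', Or.inr hp', hQ⟩
      · rintro (h | ⟨p', rfl | hp', hQ⟩)
        · exact Or.inl (Or.inl h)
        · exact Or.inl (Or.inr hQ)
        · exact Or.inr ⟨p', hp', hQ⟩
  exact (aux S PySem.Set.empty).trans (by simp [PySem.Set.empty])

-- the BFS loop computes the running count plus the best continuation of any frontier state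
theorem recBfsLoop_eq (T : List Int) (n : ℕ) :
    ∀ (j c : Int) (S : List (Int × Int)), S ≠ [] →
      -(T.length : Int) ≤ j → j ≤ T.length → (T.length - j).toNat = n →
      recBfsLoop T j S c = c + recMaxOver T j S := by
  induction n using Nat.strong_induction_on with
  | _ n ih =>
    intro j c S hS hjl hjr hn
    by_cases hend : (T.length : Int) ≤ j
    · -- j = len(T): the loop stops and every state's value is 0
      have hj : j = T.length := le_antisymm hjr hend
      rw [recBfsLoop.eq_def]
      simp only [hend, if_true]
      have hM : recMaxOver T j S = 0 := by
        refine le_antisymm (foldlMax_le _ 0 le_rfl ?_) (recMaxOver_nonneg T j S)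
        intro p _
        rw [rec.eq_def]
        simp [hj]
      omega
    · have hend := lt_of_not_ge hend
      have hjne : ¬ j = (T.length : Int) := by omega
      -- the index is in range, so T[j] is some t
      obtain ⟨t, ht⟩ : ∃ t, PySem.List.pyGet? T j = some t := by
        rcases hsome : PySem.List.pyGet? T j with _ | t
        · rw [PySem.List.pyGet?_eq_none_iff] at hsome
          exfalso
          apply hsome
          simp [PySem.Raise.InRange]
          omega
        · exact ⟨t, rfl⟩
      rw [recBfsLoop.eq_def]
      simp only [not_le.2 hend, if_false, ht]
      by_cases hnx : recBfsStep t S = ([] : List (Int × Int))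
      · -- no state has a successor: every rec value is 0
        simp only [hnx, if_true]
        have hstuck : ∀ p ∈ S, rec T p.1 p.2 j = 0 := by
          intro p hp
          rw [rec_step T p.1 p.2 j t hjne ht]
          have h1 : ¬ p.1 ≥ t := fun hge => by
            have : (p.1 - t, p.2) ∈ recBfsStep t S :=
              (mem_recBfsStep t S _).2 ⟨p, hp, Or.inl ⟨hge, rfl⟩⟩
            simp [hnx] at this
          have h2 : ¬ (p.2 ≥ t ∧ p.2 ≠ p.1) := fun hge => by
            have : (p.1, p.2 - t) ∈ recBfsStep t S :=
              (mem_recBfsStep t S _).2 ⟨p, hp, Or.inr ⟨hge.1, hge.2, rfl⟩⟩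
            simp [hnx] at this
          simp [h1, h2]
        have hM : recMaxOver T j S = 0 := by
          refine le_antisymm (foldlMax_le _ 0 le_rfl ?_) (recMaxOver_nonneg T j S)
          intro p hp
          rw [hstuck p hp]
        omega
      · simp only [hnx, if_false]
        have hrec := ih ((T.length - (j+1)).toNat) (by omega) (j+1) (c+1)
          (recBfsStep t S) hnx (by omega) (by omega) rfl
        rw [hrec]
        -- it remains: recMaxOver T j S = 1 + recMaxOver T (j+1) (recBfsStep t S)
        have hle1 : recMaxOver T j S ≤ 1 + recMaxOver T (j + 1) (recBfsStep t S) := by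
          refine foldlMax_le _ 0 (by have := recMaxOver_nonneg T (j+1) (recBfsStep t S); omega) ?_
          intro p hp
          rw [rec_step T p.1 p.2 j t hjne ht]
          have hM1 := recMaxOver_nonneg T (j+1) (recBfsStep t S)
          apply max_le
          · split_ifs with hg
            · have hmem : (p.1 - t, p.2) ∈ recBfsStep t S :=
                (mem_recBfsStep t S _).2 ⟨p, hp, Or.inl ⟨hg, rfl⟩⟩
              have := foldlMax_mem_le (fun p => rec T p.1 p.2 (j+1)) hmem 0
              dsimp only at this
              simp only [recMaxOver]
              omega
            · omega
          · split_ifs with hg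
            · have hmem : (p.1, p.2 - t) ∈ recBfsStep t S :=
                (mem_recBfsStep t S _).2 ⟨p, hp, Or.inr ⟨hg.1, hg.2, rfl⟩⟩
              have := foldlMax_mem_le (fun p => rec T p.1 p.2 (j+1)) hmem 0
              dsimp only at this
              simp only [recMaxOver]
              omega
            · omega
        have hle2 : 1 + recMaxOver T (j + 1) (recBfsStep t S) ≤ recMaxOver T j S := by
          -- some state has a successor, so the max at level j is at least 1
          obtain ⟨q0, hq0⟩ : ∃ q, q ∈ recBfsStep t S :=
            List.exists_mem_of_ne_nil _ hnx
          have hsucc : ∀ q ∈ recBfsStep t S, rec T q.1 q.2 (j+1) + 1 ≤ recMaxOver T j S := by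
            intro q hq
            obtain ⟨p, hp, hQ⟩ := (mem_recBfsStep t S q).1 hq
            have hple := foldlMax_mem_le (fun p => rec T p.1 p.2 j) hp (0 : Int)
            rw [rec_step T p.1 p.2 j t hjne ht] at hple
            rcases hQ with ⟨hg, hqe⟩ | ⟨hg, hne, hqe⟩
            · subst hqe
              rw [if_pos hg] at hple
              have hx := le_max_left (rec T (p.1 - t) p.2 (j + 1) + 1)
                (if p.2 ≥ t ∧ p.2 ≠ p.1 then rec T p.1 (p.2 - t) (j + 1) + 1 else 0)
              dsimp only
              simp only [recMaxOver]
              omega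
            · subst hqe
              rw [if_pos (show p.2 ≥ t ∧ p.2 ≠ p.1 from ⟨hg, hne⟩)] at hple
              have hx := le_max_right (if p.1 ≥ t then rec T (p.1 - t) p.2 (j + 1) + 1 else 0)
                (rec T p.1 (p.2 - t) (j + 1) + 1)
              dsimp only
              simp only [recMaxOver]
              omega
          have h1 : 1 ≤ recMaxOver T j S := by
            have := hsucc q0 hq0
            have := rec_nonneg T q0.1 q0.2 (j+1)
            omega
          have : recMaxOver T (j+1) (recBfsStep t S) ≤ recMaxOver T j S - 1 := by
            refine foldlMax_le _ 0 (by omega) ?_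
            intro q hq
            have := hsucc q hq
            omega
          omega
        simp only [recMaxOver] at hle1 hle2 ⊢
        omega

-- ===== VERDICT (by name: the statement is the Claim_ definition above) =====
theorem rec_spec : Claim_equal_rec := by
  intro T l1 l2 i _ hpre
  unfold Spec_rec rec_alt
  have h0 : PySem.Set.ofList [(l1, l2)] = [(l1, l2)] := by
    simp [PySem.Set.ofList, PySem.Set.add]
  rw [h0, recBfsLoop_eq T (T.length - i).toNat i 0 [(l1, l2)] (by simp) hpre.1 hpre.2 rfl]
  have hnn := rec_nonneg T l1 l2 i
  simp only [recMaxOver, List.foldl_cons, List.foldl_nil]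
  omega
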